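-- pv_equiv track=rewrite | github.com/DolorHunter/AutoTBOXDataSystem | HttpClient/Analysis.py | error_digits_counter
-- ===== SOURCE A (Python) =====
-- def error_digits_counter(data):
--     error_vin_category_pair = set()
--     error_vin = set()
--     error_content_counter = 0
--     if data:
--         for d in data:
--             error_content_counter += 1
--             error_vin.add(d['vin'])
--             error_vin_category_pair.add((d["vin"], d["faultCategory"]))
--     return {"vin": len(error_vin), "faultCategory": len(error_vin_category_pair),
--             "errorContent": error_content_counter}
-- ===== SOURCE B (Python) =====
-- def error_digits_counter(data):
--     pairs = []
--     if data:
--         pairs = sorted((d['vin'], d['faultCategory']) for d in data)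
--     vin_count = 0
--     pair_count = 0
--     prev = None
--     for p in pairs:
--         if prev is None or p[0] != prev[0]:
--             vin_count += 1
--         if prev is None or p != prev:
--             pair_count += 1
--         prev = p
--     return {"vin": vin_count, "faultCategory": pair_count,
--             "errorContent": len(pairs)}
-- ===== Notes on version B (the rewrite author's own statement) =====
-- stated objective: alternative
-- what changed: A builds two hash sets (vins, vin-category pairs) inside the loop; B instead sorts the (vin, category) pair list once and counts distinct vins and distinct pairs in a single adjacent-comparison sweep over the sorted list; Pre_ excludes only inputs where some record lacks the 'vin' or 'faultCategory' key, on which A (and B) raise KeyError.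
import Mathlib
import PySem

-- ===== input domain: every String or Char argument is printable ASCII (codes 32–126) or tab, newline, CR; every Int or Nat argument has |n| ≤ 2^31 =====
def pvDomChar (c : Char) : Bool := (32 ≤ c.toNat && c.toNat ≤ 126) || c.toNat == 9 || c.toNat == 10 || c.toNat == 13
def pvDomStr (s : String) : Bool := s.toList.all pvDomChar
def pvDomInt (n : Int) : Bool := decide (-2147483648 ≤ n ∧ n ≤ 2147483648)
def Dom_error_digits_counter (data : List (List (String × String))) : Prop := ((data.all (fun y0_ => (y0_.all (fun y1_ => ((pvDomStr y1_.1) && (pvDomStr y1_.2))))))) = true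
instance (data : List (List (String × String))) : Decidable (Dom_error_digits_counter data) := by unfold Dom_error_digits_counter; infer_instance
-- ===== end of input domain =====

-- B replaces A's hash-set bookkeeping by a sort-then-scan: it sorts the (vin, category)
-- pairs once and counts the distinct vins and distinct pairs in a single adjacent-comparison
-- sweep (objective: alternative algorithm, same O(n log n)-vs-O(n) ballpark, no speed claim).

-- shared record accessors (Python d['vin'] / d['faultCategory'] under Pre_, via dict get)
def pvVin (d : List (String × String)) : String := (((PySem.Dict.mk d).get? "vin").getD "")
def pvCat (d : List (String × String)) : String := (((PySem.Dict.mk d).get? "faultCategory").getD "")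

-- ===== PORT A =====
def error_digits_counter (data : List (List (String × String))) : List (String × Int) :=
  let init : PySem.Set (String × String) × PySem.Set String × Int :=
    (PySem.Set.empty, PySem.Set.empty, 0)
  let st :=
    if data.isEmpty then init
    else
      data.foldl (fun st d =>
        (PySem.Set.add st.1 (pvVin d, pvCat d),
         PySem.Set.add st.2.1 (pvVin d),
         st.2.2 + 1)) init
  [("vin", PySem.Set.len st.2.1), ("faultCategory", PySem.Set.len st.1), ("errorContent", st.2.2)]

-- ===== PORT B =====
-- one scan step: bump vin_count on a new first component, pair_count on a new pair, remember prev
def pvStep (st : Int × Int × Option (String × String)) (p : String × String) :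
    Int × Int × Option (String × String) :=
  ((match st.2.2 with | none => st.1 + 1 | some q => if p.1 ≠ q.1 then st.1 + 1 else st.1),
   (match st.2.2 with | none => st.2.1 + 1 | some q => if p ≠ q then st.2.1 + 1 else st.2.1),
   some p)

def error_digits_counter_alt (data : List (List (String × String))) : List (String × Int) :=
  -- pairs = sorted((d['vin'], d['faultCategory']) for d in data) if data else []
  -- (Python sorts the tuples lexicographically = sorted2 with keys fst, snd)
  let pairs : List (String × String) :=
    if data.isEmpty then []
    else PySem.List.sorted2 (data.map (fun d => (pvVin d, pvCat d))) Prod.fst Prod.snd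
  let st := pairs.foldl pvStep (0, 0, none)
  [("vin", st.1), ("faultCategory", st.2.1), ("errorContent", PySem.List.len pairs)]

-- ===== PRECONDITION & SPEC =====
-- Pre_ excludes exactly the inputs on which A raises KeyError: a record missing 'vin' or 'faultCategory'.
def Pre_error_digits_counter (data : List (List (String × String))) : Prop :=
  (data.all (fun d => (PySem.Dict.mk d).contains "vin" && (PySem.Dict.mk d).contains "faultCategory")) = true
instance (data : List (List (String × String))) : Decidable (Pre_error_digits_counter data) := by
  unfold Pre_error_digits_counter; infer_instance
def pvWitness_error_digits_counter : (List (List (String × String))) :=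
  [[("vin", "v1"), ("faultCategory", "c1")], [("vin", "v1"), ("faultCategory", "c2")]]
def Spec_error_digits_counter (data : List (List (String × String))) (out : List (String × Int)) : Prop := out = error_digits_counter_alt data
instance (data : List (List (String × String))) (out : List (String × Int)) : Decidable (Spec_error_digits_counter data out) := by unfold Spec_error_digits_counter; infer_instance

-- ===== CLAIM (what is proved, stated in full; the proofs are below) =====
def Claim_equal_error_digits_counter : Prop := ∀ (data : List (List (String × String))), Dom_error_digits_counter data → Pre_error_digits_counter data → Spec_error_digits_counter data (error_digits_counter data)

-- ===== LEMMAS AND PROOFS =====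

-- the lexicographic order Python uses on string pairs
def pvLexLe (a b : String × String) : Prop := a.1 < b.1 ∨ (a.1 = b.1 ∧ a.2 ≤ b.2)

def pvLt (a b : String × String) : Bool :=
  decide (a.1 < b.1) || (!decide (b.1 < a.1) && decide (a.2 < b.2))

lemma pvLt_true {a b : String × String} (h : pvLt a b = true) : pvLexLe a b := by
  unfold pvLt at h
  simp only [Bool.or_eq_true, Bool.and_eq_true, Bool.not_eq_true', decide_eq_true_eq,
    decide_eq_false_iff_not] at h
  by_cases hf : a.1 < b.1
  · exact Or.inl hf
  · rcases h with h | ⟨h1, h2⟩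
    · exact absurd h hf
    · exact Or.inr ⟨le_antisymm (not_lt.mp h1) (not_lt.mp hf), le_of_lt h2⟩

lemma pvLt_false {a b : String × String} (h : pvLt a b = false) : pvLexLe b a := by
  unfold pvLt at h
  simp only [Bool.or_eq_false_iff, Bool.and_eq_false_iff, Bool.not_eq_false',
    decide_eq_true_eq, decide_eq_false_iff_not] at h
  obtain ⟨h1, h2⟩ := h
  by_cases hb : b.1 < a.1
  · exact Or.inl hb
  · rcases h2 with h2 | h2
    · exact absurd h2 hb
    · exact Or.inr ⟨le_antisymm (not_lt.mp h1) (not_lt.mp hb), not_lt.mp h2⟩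

lemma pvLexLe_trans {a b c : String × String} (h1 : pvLexLe a b) (h2 : pvLexLe b c) :
    pvLexLe a c := by
  unfold pvLexLe at *
  rcases h1 with h1 | ⟨e1, l1⟩ <;> rcases h2 with h2 | ⟨e2, l2⟩
  · exact Or.inl (lt_trans h1 h2)
  · exact Or.inl (e2 ▸ h1)
  · exact Or.inl (e1 ▸ h2)
  · exact Or.inr ⟨e1.trans e2, le_trans l1 l2⟩

lemma pvLexLe_antisymm {a b : String × String} (h1 : pvLexLe a b) (h2 : pvLexLe b a) :
    a = b := by
  unfold pvLexLe at *
  rcases h1 with h1 | ⟨e1, l1⟩ <;> rcases h2 with h2 | ⟨e2, l2⟩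
  · exact absurd h2 (lt_asymm h1)
  · exact absurd h1 (e2 ▸ lt_irrefl _)
  · exact absurd h2 (e1 ▸ lt_irrefl _)
  · exact Prod.ext_iff.mpr ⟨e1, le_antisymm l1 l2⟩

lemma pvInsertBy_pairwise (x : String × String) :
    ∀ (l : List (String × String)), l.Pairwise pvLexLe →
      (PySem.List.insertBy pvLt x l).Pairwise pvLexLe
  | [], _ => by simp [PySem.List.insertBy]
  | y :: ys, h => by
    rw [PySem.List.insertBy]
    obtain ⟨hy, hys⟩ := List.pairwise_cons.mp h
    by_cases hb : pvLt x y = true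
    · rw [if_pos hb]
      have hxy := pvLt_true hb
      refine List.pairwise_cons.mpr ⟨?_, h⟩
      intro z hz
      rcases List.mem_cons.mp hz with rfl | hz
      · exact hxy
      · exact pvLexLe_trans hxy (hy z hz)
    · rw [if_neg hb]
      have hyx := pvLt_false (by simpa using hb)
      refine List.pairwise_cons.mpr ⟨?_, pvInsertBy_pairwise x ys hys⟩
      intro z hz
      rcases (PySem.List.mem_insertBy _ _ _ _).mp hz with rfl | hz
      · exact hyx
      · exact hy z hz

lemma pvSorted2_eq (xs : List (String × String)) :
    PySem.List.sorted2 xs Prod.fst Prod.snd false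
      = xs.foldl (fun acc x => PySem.List.insertBy pvLt x acc) [] := rfl

lemma pvFoldl_insertBy_pairwise (xs : List (String × String)) :
    ∀ (acc : List (String × String)), acc.Pairwise pvLexLe →
      (xs.foldl (fun acc x => PySem.List.insertBy pvLt x acc) acc).Pairwise pvLexLe := by
  induction xs with
  | nil => intro acc h; exact h
  | cons x t ih => intro acc h; exact ih _ (pvInsertBy_pairwise x acc h)

lemma pvSorted2_pairwise (xs : List (String × String)) :
    (PySem.List.sorted2 xs Prod.fst Prod.snd false).Pairwise pvLexLe := by
  rw [pvSorted2_eq]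
  exact pvFoldl_insertBy_pairwise xs [] (by simp)

-- cardinality step: inserting a counts one more than erasing it
lemma pvCard_insert_erase {β : Type} [DecidableEq β] (s : Finset β) (a : β) :
    (insert a s).card = (s.erase a).card + 1 := by
  have h : insert a s = insert a (s.erase a) := by
    ext z; by_cases hz : z = a <;> simp [hz]
  rw [h, Finset.card_insert_of_notMem (Finset.notMem_erase _ _)]

-- the scan invariant: after a lower bound prev, the two counters count the distinct
-- first components / distinct pairs that differ from prev
lemma pvScan (l : List (String × String)) (hl : l.Pairwise pvLexLe)
    (prev : String × String) (hprev : ∀ x ∈ l, pvLexLe prev x) (a b : Int) :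
    l.foldl pvStep (a, b, some prev)
      = (a + (((l.map Prod.fst).toFinset.erase prev.1).card : Int),
         b + ((l.toFinset.erase prev).card : Int),
         some ((prev :: l).getLast (by simp))) := by
  induction l generalizing prev a b with
  | nil => simp
  | cons p t ih =>
    obtain ⟨hp, ht⟩ := List.pairwise_cons.mp hl
    have hprevp : pvLexLe prev p := hprev p List.mem_cons_self
    have step_eq : pvStep (a, b, some prev) p
        = ((if p.1 ≠ prev.1 then a + 1 else a), (if p ≠ prev then b + 1 else b), some p) := rfl
    rw [List.foldl_cons, step_eq, ih ht p hp]
    simp only [Prod.mk.injEq]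
    refine ⟨?_, ?_, ?_⟩
    · -- vin counter
      by_cases hv : p.1 = prev.1
      · rw [if_neg (by simp [hv]), List.map_cons, List.toFinset_cons, hv,
          Finset.erase_insert_eq_erase]
      · have hlt : prev.1 < p.1 := by
          rcases hprevp with h | ⟨e, _⟩
          · exact h
          · exact absurd e.symm hv
        have hnot : prev.1 ∉ ((p :: t).map Prod.fst).toFinset := by
          simp only [List.mem_toFinset, List.mem_map]
          rintro ⟨x, hx, hxe⟩
          rcases List.mem_cons.mp hx with rfl | hx
          · exact hv hxe
          · have hpx : p.1 ≤ x.1 := by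
              rcases hp x hx with h | ⟨e, _⟩
              · exact le_of_lt h
              · exact le_of_eq e
            exact lt_irrefl _ (hxe ▸ lt_of_lt_of_le hlt hpx)
        rw [if_pos (by simp [hv]), Finset.erase_eq_of_notMem hnot, List.map_cons,
          List.toFinset_cons, pvCard_insert_erase]
        all_goals (push_cast; try ring)
    · -- pair counter
      by_cases hv : p = prev
      · rw [if_neg (by simp [hv]), List.toFinset_cons, hv, Finset.erase_insert_eq_erase]
      · have hnot : prev ∉ (p :: t).toFinset := by
          simp only [List.mem_toFinset]
          intro hx
          rcases List.mem_cons.mp hx with he | hx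
          · exact hv he.symm
          · exact hv (pvLexLe_antisymm hprevp (hp _ hx)).symm
        rw [if_pos hv, Finset.erase_eq_of_notMem hnot, List.toFinset_cons,
          pvCard_insert_erase]
        all_goals (push_cast; try ring)
    · exact congrArg some (List.getLast_cons (by simp)).symm

-- B's scan over the whole (nonempty) sorted list counts all distinct firsts / pairs
lemma pvScan_full (l : List (String × String)) (hl : l.Pairwise pvLexLe) (hne : l ≠ []) :
    (l.foldl pvStep (0, 0, none)).1 = ((l.map Prod.fst).toFinset.card : Int)
    ∧ (l.foldl pvStep (0, 0, none)).2.1 = ((l.toFinset.card : Int)) := by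
  obtain ⟨p, t, rfl⟩ := List.exists_cons_of_ne_nil hne
  obtain ⟨hp, ht⟩ := List.pairwise_cons.mp hl
  have step0 : pvStep ((0 : Int), (0 : Int), none) p = (1, 1, some p) := rfl
  rw [List.foldl_cons, step0, pvScan t ht p hp 1 1]
  constructor
  · show (1 : Int) + _ = _
    rw [List.map_cons, List.toFinset_cons, pvCard_insert_erase]; all_goals (push_cast; try ring)
  · show (1 : Int) + _ = _
    rw [List.toFinset_cons, pvCard_insert_erase]; all_goals (push_cast; try ring)

-- A's three-accumulator loop is three independent folds
lemma pvAfold (data : List (List (String × String))) :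
    ∀ (s1 : PySem.Set (String × String)) (s2 : PySem.Set String) (c : Int),
      data.foldl (fun st d =>
        (PySem.Set.add st.1 (pvVin d, pvCat d), PySem.Set.add st.2.1 (pvVin d), st.2.2 + 1))
        (s1, s2, c)
      = ((data.map (fun d => (pvVin d, pvCat d))).foldl PySem.Set.add s1,
         (data.map pvVin).foldl PySem.Set.add s2,
         c + data.length) := by
  induction data with
  | nil => intro s1 s2 c; simp
  | cons d t ih =>
    intro s1 s2 c
    simp only [List.foldl_cons, List.map_cons, List.length_cons, ih, Prod.mk.injEq, true_and]
    all_goals (push_cast; try ring)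

-- a PySem set of xs has as many elements as xs has distinct elements
lemma pvSetLen_eq_card {β : Type} [DecidableEq β] [BEq β] [LawfulBEq β] (xs : List β) :
    PySem.Set.len (PySem.Set.ofList xs) = (xs.toFinset.card : Int) := by
  have hfs : (PySem.Set.ofList xs).toFinset = xs.toFinset := by
    ext z; simp [PySem.Set.mem_ofList]
  rw [PySem.Set.len, ← List.toFinset_card_of_nodup (PySem.Set.nodup_ofList xs), hfs]

-- ===== VERDICT (by name: the statement is the Claim_ definition above) =====
theorem error_digits_counter_spec : Claim_equal_error_digits_counter := by
  intro data _ _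
  unfold Spec_error_digits_counter error_digits_counter error_digits_counter_alt
  by_cases hemp : data.isEmpty
  · simp [hemp, PySem.Set.len, PySem.Set.empty, PySem.List.len]
  · simp only [hemp, if_false, Bool.false_eq_true]
    have hdne : data ≠ [] := by simpa [List.isEmpty_iff] using hemp
    have hA := pvAfold data PySem.Set.empty PySem.Set.empty 0
    set xs := data.map (fun d => (pvVin d, pvCat d)) with hxs
    set l := PySem.List.sorted2 xs Prod.fst Prod.snd false with hldef
    have hperm : l.Perm xs := PySem.List.sorted2_perm xs Prod.fst Prod.snd false
    have hlne : l ≠ [] := by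
      intro h
      have := hperm.length_eq
      rw [h, hxs] at this
      simp at this
      exact hdne (List.length_eq_zero_iff.mp this.symm)
    obtain ⟨hB1, hB2⟩ := pvScan_full l (pvSorted2_pairwise xs) hlne
    have hvmap : data.map pvVin = xs.map Prod.fst := by
      rw [hxs, List.map_map]; rfl
    have hA1 : PySem.Set.len ((data.map pvVin).foldl PySem.Set.add PySem.Set.empty)
        = ((l.map Prod.fst).toFinset.card : Int) := by
      rw [hvmap, show (PySem.Set.empty : PySem.Set String) = [] from rfl,
        ← PySem.Set.ofList_eq_foldl, pvSetLen_eq_card, (List.toFinset_eq_of_perm _ _ (hperm.map Prod.fst))]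
    have hA2 : PySem.Set.len (xs.foldl PySem.Set.add PySem.Set.empty)
        = ((l.toFinset.card : Int)) := by
      rw [show (PySem.Set.empty : PySem.Set (String × String)) = [] from rfl,
        ← PySem.Set.ofList_eq_foldl, pvSetLen_eq_card, List.toFinset_eq_of_perm _ _ hperm]
    have hlen : PySem.List.len l = (0 : Int) + data.length := by
      have h1 : l.length = data.length := by
        rw [hperm.length_eq, hxs, List.length_map]
      simp [PySem.List.len, h1]
    rw [hA]
    simp only [List.cons.injEq, Prod.mk.injEq, true_and, and_true]
    exact ⟨hA1.trans hB1.symm, hA2.trans hB2.symm, hlen.symm⟩
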